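-- pv_equiv track=rewrite | github.com/LordMirex/mytypist-prototype | app.py | get_smart_placeholder_default
-- ===== SOURCE A (Python) =====
-- def get_smart_placeholder_default(var_name):
--     """COMPREHENSIVE placeholder defaults for ALL variable name formats."""
--     name_lower = var_name.lower()
--
--     # Name variations - ALL POSSIBLE FORMATS
--     if any(x in name_lower for x in ['name', 'full_name', 'student_name', 'applicant_name', 'name_1']):
--         return "Joe Doe"
--
--
--     # Address variations - ALL POSSIBLE FORMATS
--     elif any(x in name_lower for x in ['address', 'sender_address', 'my_address', 'location', 'residence']):
--         return "24 Avenue Avenue, Osato Junction, Benin City, Edo State"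
--     elif 'street' in name_lower:
--         return "24 Avenue Avenue"
--     elif any(x in name_lower for x in ['city', 'town']):
--         return "Benin City"
--     elif 'state' in name_lower:
--         return "Edo State"
--
--     # Department/Faculty variations
--     elif any(x in name_lower for x in ['department', 'dept']):
--         return "Production Engineering"
--     elif any(x in name_lower for x in ['faculty']):
--         return "Engineering"
--     elif any(x in name_lower for x in ['college', 'institution', 'university', 'school']):
--         return "University of Benin"
--
--     # Academic info - ALL FORMATS
--     elif any(x in name_lower for x in ['mat_no', 'matric_no', 'reg_no', 'id', 'student_id', 'registration_number']):
--         return "ENG2204223"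
--
--
--     # Gender variations - ALL FORMATS
--     elif 'gender' in name_lower:
--         return "Male"
--     elif any(x in name_lower for x in ['his_her', 'his_she']):
--         return "his"
--     elif any(x in name_lower for x in ['him_her', 'him_she']):
--         return "him"
--     elif any(x in name_lower for x in ['he_she', 'heshe']):
--         return "he"
--
--
--     # Dates - NO PLACEHOLDER (auto-filled)
--     elif any(x in name_lower for x in ['date', 'time']):
--         return ""  # Will be auto-filled with current date
--
--     # Default for unrecognized
--     return f"Enter {var_name.replace('_', ' ').title()}"
-- ===== SOURCE B (Python) =====
-- # Flat (keyword, value) table, scanned BACK-TO-FRONT with an overwrite accumulator: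
-- # no early return and no nested any(); the last assignment (= earliest keyword in
-- # priority order) wins, which reproduces A's first-match if/elif chain.
-- DEFAULTS = [
--     ("name", "Joe Doe"),
--     ("full_name", "Joe Doe"),
--     ("student_name", "Joe Doe"),
--     ("applicant_name", "Joe Doe"),
--     ("name_1", "Joe Doe"),
--     ("address", "24 Avenue Avenue, Osato Junction, Benin City, Edo State"),
--     ("sender_address", "24 Avenue Avenue, Osato Junction, Benin City, Edo State"),
--     ("my_address", "24 Avenue Avenue, Osato Junction, Benin City, Edo State"),
--     ("location", "24 Avenue Avenue, Osato Junction, Benin City, Edo State"),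
--     ("residence", "24 Avenue Avenue, Osato Junction, Benin City, Edo State"),
--     ("street", "24 Avenue Avenue"),
--     ("city", "Benin City"),
--     ("town", "Benin City"),
--     ("state", "Edo State"),
--     ("department", "Production Engineering"),
--     ("dept", "Production Engineering"),
--     ("faculty", "Engineering"),
--     ("college", "University of Benin"),
--     ("institution", "University of Benin"),
--     ("university", "University of Benin"),
--     ("school", "University of Benin"),
--     ("mat_no", "ENG2204223"),
--     ("matric_no", "ENG2204223"),
--     ("reg_no", "ENG2204223"),
--     ("id", "ENG2204223"),
--     ("student_id", "ENG2204223"),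
--     ("registration_number", "ENG2204223"),
--     ("gender", "Male"),
--     ("his_her", "his"),
--     ("his_she", "his"),
--     ("him_her", "him"),
--     ("him_she", "him"),
--     ("he_she", "he"),
--     ("heshe", "he"),
--     ("date", ""),
--     ("time", ""),
-- ]
--
--
-- def get_smart_placeholder_default(var_name):
--     """Accumulator scan of the flat keyword table from lowest to highest priority."""
--     name_lower = var_name.lower()
--     result = "Enter " + var_name.replace("_", " ").title()
--     for keyword, value in reversed(DEFAULTS):
--         if keyword in name_lower:
--             result = value
--     return result
-- ===== Notes on version B (the rewrite author's own statement) =====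
-- stated objective: alternative
-- what changed: A's 14-branch if/elif chain with nested any() keyword groups becomes a single flat (keyword, value) table scanned back-to-front with an overwrite accumulator and no early return: the result starts at the title-cased fallback and the last overwrite (= highest-priority keyword) wins.
import Mathlib
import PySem

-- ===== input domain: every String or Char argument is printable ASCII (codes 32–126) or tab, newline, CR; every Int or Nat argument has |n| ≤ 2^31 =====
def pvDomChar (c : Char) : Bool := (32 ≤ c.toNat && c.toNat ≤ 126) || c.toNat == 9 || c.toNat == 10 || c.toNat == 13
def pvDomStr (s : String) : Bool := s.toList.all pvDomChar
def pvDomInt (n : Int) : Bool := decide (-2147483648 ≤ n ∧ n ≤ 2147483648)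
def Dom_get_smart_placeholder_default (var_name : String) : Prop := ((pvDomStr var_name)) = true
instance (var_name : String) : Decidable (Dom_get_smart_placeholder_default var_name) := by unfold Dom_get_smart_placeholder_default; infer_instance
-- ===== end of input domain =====

-- B replaces A's 14-branch first-match if/elif chain by a reversed accumulator scan over one flat
-- (keyword, value) table — no early exit, last overwrite wins ('alternative'); same value everywhere.

-- shared helper: Python's str.title(), exact on ASCII (a letter starts upper after a non-letter, lower otherwise)
def pvTitleGo (prev : Bool) : List Char → List Char
  | [] => []
  | c :: rest =>
    (if PySem.Chars.isalpha c then
        (if prev then PySem.Chars.lowerChar c else PySem.Chars.upperChar c)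
      else c) :: pvTitleGo (PySem.Chars.isalpha c) rest

def pvTitle (s : String) : String := String.ofList (pvTitleGo false s.toList)

-- ===== PORT A =====
def get_smart_placeholder_default (var_name : String) : String :=
  let nl := PySem.Str.lower var_name
  if ["name", "full_name", "student_name", "applicant_name", "name_1"].any (fun x => PySem.Str.isIn x nl) then
    "Joe Doe"
  else if ["address", "sender_address", "my_address", "location", "residence"].any (fun x => PySem.Str.isIn x nl) then
    "24 Avenue Avenue, Osato Junction, Benin City, Edo State"
  else if PySem.Str.isIn "street" nl then
    "24 Avenue Avenue"
  else if ["city", "town"].any (fun x => PySem.Str.isIn x nl) then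
    "Benin City"
  else if PySem.Str.isIn "state" nl then
    "Edo State"
  else if ["department", "dept"].any (fun x => PySem.Str.isIn x nl) then
    "Production Engineering"
  else if ["faculty"].any (fun x => PySem.Str.isIn x nl) then
    "Engineering"
  else if ["college", "institution", "university", "school"].any (fun x => PySem.Str.isIn x nl) then
    "University of Benin"
  else if ["mat_no", "matric_no", "reg_no", "id", "student_id", "registration_number"].any (fun x => PySem.Str.isIn x nl) then
    "ENG2204223"
  else if PySem.Str.isIn "gender" nl then
    "Male"
  else if ["his_her", "his_she"].any (fun x => PySem.Str.isIn x nl) then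
    "his"
  else if ["him_her", "him_she"].any (fun x => PySem.Str.isIn x nl) then
    "him"
  else if ["he_she", "heshe"].any (fun x => PySem.Str.isIn x nl) then
    "he"
  else if ["date", "time"].any (fun x => PySem.Str.isIn x nl) then
    ""
  else
    "Enter " ++ pvTitle (PySem.Str.replace var_name "_" " ")

-- ===== PORT B =====
def pvDefaults : List (String × String) :=
  [ ("name", "Joe Doe"),
    ("full_name", "Joe Doe"),
    ("student_name", "Joe Doe"),
    ("applicant_name", "Joe Doe"),
    ("name_1", "Joe Doe"),
    ("address", "24 Avenue Avenue, Osato Junction, Benin City, Edo State"),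
    ("sender_address", "24 Avenue Avenue, Osato Junction, Benin City, Edo State"),
    ("my_address", "24 Avenue Avenue, Osato Junction, Benin City, Edo State"),
    ("location", "24 Avenue Avenue, Osato Junction, Benin City, Edo State"),
    ("residence", "24 Avenue Avenue, Osato Junction, Benin City, Edo State"),
    ("street", "24 Avenue Avenue"),
    ("city", "Benin City"),
    ("town", "Benin City"),
    ("state", "Edo State"),
    ("department", "Production Engineering"),
    ("dept", "Production Engineering"),
    ("faculty", "Engineering"),
    ("college", "University of Benin"),
    ("institution", "University of Benin"),
    ("university", "University of Benin"),
    ("school", "University of Benin"),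
    ("mat_no", "ENG2204223"),
    ("matric_no", "ENG2204223"),
    ("reg_no", "ENG2204223"),
    ("id", "ENG2204223"),
    ("student_id", "ENG2204223"),
    ("registration_number", "ENG2204223"),
    ("gender", "Male"),
    ("his_her", "his"),
    ("his_she", "his"),
    ("him_her", "him"),
    ("him_she", "him"),
    ("he_she", "he"),
    ("heshe", "he"),
    ("date", ""),
    ("time", "") ]

def get_smart_placeholder_default_alt (var_name : String) : String :=
  let nl := PySem.Str.lower var_name
  pvDefaults.reverse.foldl
    (fun result kv => if PySem.Str.isIn kv.1 nl then kv.2 else result)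
    ("Enter " ++ pvTitle (PySem.Str.replace var_name "_" " "))

-- ===== PRECONDITION & SPEC =====
def Spec_get_smart_placeholder_default (var_name : String) (out : String) : Prop := out = get_smart_placeholder_default_alt var_name
instance (var_name : String) (out : String) : Decidable (Spec_get_smart_placeholder_default var_name out) := by unfold Spec_get_smart_placeholder_default; infer_instance

-- ===== CLAIM (what is proved, stated in full; the proofs are below) =====
def Claim_equal_get_smart_placeholder_default : Prop := ∀ (var_name : String), Dom_get_smart_placeholder_default var_name → Spec_get_smart_placeholder_default var_name (get_smart_placeholder_default var_name)

-- ===== LEMMAS AND PROOFS =====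

-- B's reversed overwrite scan computes the FIRST match of the forward list (find?)
theorem pvFoldRev_eq_find (p : String → Bool) (l : List (String × String)) (d : String) :
    l.reverse.foldl (fun result kv => if p kv.1 then kv.2 else result) d
      = (match l.find? (fun kv => p kv.1) with | some kv => kv.2 | none => d) := by
  rw [List.foldl_reverse]
  induction l with
  | nil => rfl
  | cons a l ih =>
    cases h : p a.1 <;> simp [List.find?, h, ih]

theorem pvFind?_cons_ite {α : Type} (p : α → Bool) (a : α) (l : List α) :
    List.find? p (a :: l) = if p a then some a else List.find? p l := by
  cases h : p a <;> simp [h]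

theorem pvStep (b : Bool) (k v : String) (rest : Option (String × String)) (d : String) :
    (match (if b then some (k, v) else rest) with | some kv => kv.2 | none => d)
    = if b then v else (match rest with | some kv => kv.2 | none => d) := by
  cases b <;> rfl

theorem pv_if_or (a b : Bool) (v r : String) :
    (if (a || b) = true then v else r) = if a = true then v else if b = true then v else r := by
  cases a <;> simp

-- A's if/elif chain equals find? over the flat keyword table
set_option maxHeartbeats 2000000 in
theorem pvChain_eq (p : String → Bool) (d : String) :
    (if ["name", "full_name", "student_name", "applicant_name", "name_1"].any p then "Joe Doe"
     else if ["address", "sender_address", "my_address", "location", "residence"].any p then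
       "24 Avenue Avenue, Osato Junction, Benin City, Edo State"
     else if p "street" then "24 Avenue Avenue"
     else if ["city", "town"].any p then "Benin City"
     else if p "state" then "Edo State"
     else if ["department", "dept"].any p then "Production Engineering"
     else if ["faculty"].any p then "Engineering"
     else if ["college", "institution", "university", "school"].any p then "University of Benin"
     else if ["mat_no", "matric_no", "reg_no", "id", "student_id", "registration_number"].any p then "ENG2204223"
     else if p "gender" then "Male"
     else if ["his_her", "his_she"].any p then "his"
     else if ["him_her", "him_she"].any p then "him"
     else if ["he_she", "heshe"].any p then "he"
     else if ["date", "time"].any p then ""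
     else d) =
    (match pvDefaults.find? (fun kv => p kv.1) with
     | some kv => kv.2
     | none => d) := by
  simp only [pvDefaults, pvFind?_cons_ite, List.find?_nil, pvStep, List.any_cons,
    List.any_nil, Bool.or_false, pv_if_or]

-- ===== VERDICT (by name: the statement is the Claim_ definition above) =====
theorem get_smart_placeholder_default_spec : Claim_equal_get_smart_placeholder_default := by
  intro v _
  unfold Spec_get_smart_placeholder_default get_smart_placeholder_default get_smart_placeholder_default_alt
  rw [pvFoldRev_eq_find (fun x => PySem.Str.isIn x (PySem.Str.lower v)) pvDefaults
    ("Enter " ++ pvTitle (PySem.Str.replace v "_" " "))]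
  exact pvChain_eq (fun x => PySem.Str.isIn x (PySem.Str.lower v))
    ("Enter " ++ pvTitle (PySem.Str.replace v "_" " "))
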